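-- pv_equiv track=rewrite | github.com/derek44554/BlockLink | blocklink/utils/tools.py | extract_by_space
-- ===== SOURCE A (Python) =====
-- def extract_by_space(text, position):
--     """
--     数据由空格分开 position 获取第几条数据
--     :param text: 输入
--     :param position: 位置
--     :return:
--     """
--     # Remove any trailing spaces first
--     input_str = text.rstrip()
--
--     # Initialize variables
--     last_index = 0
--     space_count = 0
--
--     # Loop through the string to find space positions
--     while space_count < position - 1:
--         space_index = input_str.find(' ', last_index)
--         if space_index == -1:
--             return None  # Not enough spaces found
--         last_index = space_index + 1
--         space_count += 1
--
--     # Find the start of the next part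
--     space_index = input_str.find(' ', last_index)
--     if space_index == -1:
--         return input_str[last_index:]  # If no more spaces, return the rest of the string
--     else:
--         return input_str[last_index:space_index]  # Return the part between the spaces
-- ===== SOURCE B (Python) =====
-- def extract_by_space(text, position):
--     """Extract the Nth single-space-separated field (1-based; clamped to the
--     first field for position <= 1), or None if there are not enough fields."""
--     parts = text.rstrip().split(' ')
--     idx = max(position - 1, 0)
--     if idx < len(parts):
--         return parts[idx]
--     return None
-- ===== Notes on version B (the rewrite author's own statement) =====
-- stated objective: idiomatic
-- what changed: Replaces the incremental find-loop over space positions with a single rstrip+split(' ') producing all fields at once, then indexing the clamped position.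
import Mathlib
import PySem

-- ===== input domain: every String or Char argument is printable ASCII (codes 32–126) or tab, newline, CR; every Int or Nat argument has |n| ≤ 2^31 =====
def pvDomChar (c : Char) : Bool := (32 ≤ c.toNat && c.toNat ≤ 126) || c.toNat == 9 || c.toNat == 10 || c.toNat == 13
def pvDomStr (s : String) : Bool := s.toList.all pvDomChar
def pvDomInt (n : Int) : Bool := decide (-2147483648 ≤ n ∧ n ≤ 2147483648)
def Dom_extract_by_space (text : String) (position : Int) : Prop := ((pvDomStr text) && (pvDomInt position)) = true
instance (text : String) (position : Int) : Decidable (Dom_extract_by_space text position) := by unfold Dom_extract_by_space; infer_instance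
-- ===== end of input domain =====

-- B replaces A's incremental find-loop over space positions by one rstrip+split(' ') and an index (same cost, more idiomatic).

-- ===== PORT A =====
-- A's 'while space_count < position - 1' loop: structural recursion on the number of
-- remaining iterations (position - 1 - space_count), carrying last_index; the 0 case
-- is the code after the loop.
def loopA (s : List Char) : Nat → Nat → Option (List Char)
  | last, 0 =>
      let si := PySem.Chars.findFrom s [' '] (last : Int) none
      if si = -1 then some (PySem.List.slice s (some (last : Int)) none)
      else some (PySem.List.slice s (some (last : Int)) (some si))
  | last, n+1 =>
      let si := PySem.Chars.findFrom s [' '] (last : Int) none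
      if si = -1 then none
      else loopA s (si.toNat + 1) n

def extract_by_space (text : String) (position : Int) : Option String :=
  let input := PySem.Chars.rstrip text.toList
  (loopA input 0 (position - 1).toNat).map String.ofList

-- ===== PORT B =====
-- parts = text.rstrip().split(' '); idx = max(position - 1, 0); parts[idx] if idx < len(parts) else None
def extract_by_space_alt (text : String) (position : Int) : Option String :=
  let parts := PySem.Chars.splitOn (PySem.Chars.rstrip text.toList) [' ']
  let idx := max (position - 1) 0
  if idx < (parts.length : Int) then (PySem.List.pyGet? parts idx).map String.ofList
  else none

-- ===== PRECONDITION & SPEC =====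
def Spec_extract_by_space (text : String) (position : Int) (out : Option String) : Prop := out = extract_by_space_alt text position
instance (text : String) (position : Int) (out : Option String) : Decidable (Spec_extract_by_space text position out) := by unfold Spec_extract_by_space; infer_instance

-- ===== CLAIM (what is proved, stated in full; the proofs are below) =====
def Claim_equal_extract_by_space : Prop := ∀ (text : String) (position : Int), Dom_extract_by_space text position → Spec_extract_by_space text position (extract_by_space text position)

-- ===== LEMMAS AND PROOFS =====

lemma go_no_space (l : List Char) (fuel : Nat) (cur : List Char) (acc : List (List Char)) (h : ' ' ∉ l) :
    PySem.Chars.splitOn.go [' '] fuel l cur acc = ((cur.reverse ++ l) :: acc).reverse := by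
  induction l generalizing fuel cur with
  | nil =>
    cases fuel <;> simp [PySem.Chars.splitOn.go]
  | cons c rest ih =>
    cases fuel with
    | zero => simp [PySem.Chars.splitOn.go]
    | succ f =>
      have hc : c ≠ ' ' := by rintro rfl; exact h (List.mem_cons_self)
      rw [PySem.Chars.splitOn.go]
      simp [List.isPrefixOf, hc.symm, ih f (c :: cur) (fun hm => h (List.mem_cons_of_mem _ hm))]

lemma go_space (a : List Char) (b : List Char) (fuel : Nat) (cur : List Char) (acc : List (List Char))
    (h : ' ' ∉ a) (hf : a.length < fuel) :
    PySem.Chars.splitOn.go [' '] fuel (a ++ ' ' :: b) cur acc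
      = PySem.Chars.splitOn.go [' '] (fuel - a.length - 1) b [] ((cur.reverse ++ a) :: acc) := by
  induction a generalizing fuel cur with
  | nil =>
    cases fuel with
    | zero => omega
    | succ f => simp only [List.nil_append]; rw [PySem.Chars.splitOn.go]; simp [List.isPrefixOf]
  | cons c rest ih =>
    cases fuel with
    | zero => omega
    | succ f =>
      have hc : c ≠ ' ' := by rintro rfl; exact h (List.mem_cons_self)
      simp only [List.cons_append]
      rw [PySem.Chars.splitOn.go]
      have := ih f (c :: cur) (fun hm => h (List.mem_cons_of_mem _ hm)) (by simpa using Nat.lt_of_succ_lt_succ hf)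
      simp [List.isPrefixOf, hc.symm] at this ⊢
      rw [this]

lemma go_acc (fuel : Nat) (l : List Char) (cur : List Char) (acc : List (List Char)) :
    PySem.Chars.splitOn.go [' '] fuel l cur acc = acc.reverse ++ PySem.Chars.splitOn.go [' '] fuel l cur [] := by
  induction fuel generalizing l cur acc with
  | zero => simp [PySem.Chars.splitOn.go]
  | succ f ih =>
    cases l with
    | nil => simp [PySem.Chars.splitOn.go]
    | cons c rest =>
      by_cases hc : c = ' '
      · subst hc
        rw [PySem.Chars.splitOn.go]
        conv_rhs => rw [PySem.Chars.splitOn.go]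
        simp [List.isPrefixOf]
        rw [ih, ih rest [] [cur.reverse]]
        simp
      · rw [PySem.Chars.splitOn.go]
        conv_rhs => rw [PySem.Chars.splitOn.go]
        simp [List.isPrefixOf, Ne.symm hc]
        exact ih _ _ _

lemma splitOn_no_space (l : List Char) (h : ' ' ∉ l) :
    PySem.Chars.splitOn l [' '] = [l] := by
  rw [PySem.Chars.splitOn, go_no_space l _ _ _ h]; simp

lemma splitOn_split (a b : List Char) (h : ' ' ∉ a) :
    PySem.Chars.splitOn (a ++ ' ' :: b) [' '] = a :: PySem.Chars.splitOn b [' '] := by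
  rw [PySem.Chars.splitOn, go_space a b _ [] [] h (by simp only [List.length_append, List.length_cons]; omega), go_acc, PySem.Chars.splitOn]
  have hfuel : (a ++ ' ' :: b).length + 1 - a.length - 1 = b.length + 1 := by simp only [List.length_append, List.length_cons]; omega
  rw [hfuel]
  simp

-- decomposition at the first space
lemma find_decomp (t : List Char) (h : PySem.Chars.find t [' '] ≠ -1) :
    let j := (PySem.Chars.find t [' ']).toNat
    j < t.length ∧ t = t.take j ++ ' ' :: t.drop (j+1) ∧ ' ' ∉ t.take j := by
  intro j
  have h0 : 0 ≤ PySem.Chars.find t [' '] := by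
    have := PySem.Chars.neg_one_le_find t [' ']
    omega
  obtain ⟨hpre, hmin⟩ := PySem.Chars.find_spec h0
  rcases hpre with ⟨r, hr⟩
  have h1 : t.drop j = ' ' :: r := by simpa using hr.symm
  have hjlen : j < t.length := by
    have : (t.drop j).length = r.length + 1 := by rw [h1]; simp
    simp at this; omega
  have h2 : t.drop (j+1) = r := by
    have := congrArg (List.drop 1) h1
    simpa [List.drop_drop, Nat.add_comm] using this
  have hdropj : t.drop j = ' ' :: t.drop (j+1) := by rw [h1, h2]
  refine ⟨hjlen, ?_, ?_⟩
  · conv_lhs => rw [← List.take_append_drop j t]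
    rw [hdropj]
  · intro hmem
    obtain ⟨i, hi, hti⟩ := List.getElem_of_mem hmem
    have hij : i < j := by
      have := hi; simp at this; omega
    have hti' : t[i]'(lt_trans hij hjlen) = ' ' := by
      simpa using hti
    apply hmin i hij
    have hdi : t.drop i = ' ' :: t.drop (i+1) := by
      rw [List.drop_eq_getElem_cons (lt_trans hij hjlen)]
      simp [hti']
    rw [hdi]
    exact ⟨_, rfl⟩

lemma loopA_eq (n : Nat) (s : List Char) (last : Nat) (hle : last ≤ s.length) :
    loopA s last n = (PySem.Chars.splitOn (s.drop last) [' '])[n]? := by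
  induction n generalizing last with
  | zero =>
    rw [loopA]
    rw [PySem.Chars.findFrom_natCast s [' '] last hle]
    by_cases hf : PySem.Chars.find (s.drop last) [' '] = -1
    · have hnos : ' ' ∉ s.drop last := by
        rw [PySem.Chars.find_eq_neg_one_iff] at hf
        simpa [List.singleton_infix_iff] using hf
      simp [hf, splitOn_no_space _ hnos, PySem.List.slice_from_natCast]
    · obtain ⟨hjlen, hdec, hnot⟩ := find_decomp _ hf
      set j := (PySem.Chars.find (s.drop last) [' ']).toNat with hj
      have h0 : 0 ≤ PySem.Chars.find (s.drop last) [' '] := by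
        have := PySem.Chars.neg_one_le_find (s.drop last) [' ']
        omega
      have hcast : PySem.Chars.find (s.drop last) [' '] = (j : Int) := by omega
      have hne : ¬((last : Int) + PySem.Chars.find (s.drop last) [' '] = -1) := by omega
      simp only [hf, hne, ite_false]
      rw [hcast, PySem.List.slice_natCast_add]
      conv_rhs => rw [hdec, splitOn_split _ _ hnot]
      simp
  | succ n ih =>
    rw [loopA]
    rw [PySem.Chars.findFrom_natCast s [' '] last hle]
    by_cases hf : PySem.Chars.find (s.drop last) [' '] = -1
    · have hnos : ' ' ∉ s.drop last := by
        rw [PySem.Chars.find_eq_neg_one_iff] at hf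
        simpa [List.singleton_infix_iff] using hf
      simp [hf, splitOn_no_space _ hnos]
    · obtain ⟨hjlen, hdec, hnot⟩ := find_decomp _ hf
      set j := (PySem.Chars.find (s.drop last) [' ']).toNat with hj
      have hne : ¬((last : Int) + PySem.Chars.find (s.drop last) [' '] = -1) := by
        have := PySem.Chars.neg_one_le_find (s.drop last) [' ']
        omega
      simp only [hf, ite_false, hne]
      have htn : ((last : Int) + PySem.Chars.find (s.drop last) [' ']).toNat = last + j := by
        have := PySem.Chars.neg_one_le_find (s.drop last) [' ']
        omega
      rw [htn]
      have hlen : last + j < s.length := by simp at hjlen; omega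
      rw [ih (last + j + 1) (by omega)]
      have hdd : s.drop (last + j + 1) = (s.drop last).drop (j + 1) := by
        rw [List.drop_drop]; ring_nf
      rw [hdd]
      conv_rhs => rw [hdec, splitOn_split _ _ hnot]
      simp

lemma ports_agree (text : String) (position : Int) :
    extract_by_space text position = extract_by_space_alt text position := by
  show Option.map String.ofList (loopA (PySem.Chars.rstrip text.toList) 0 (position - 1).toNat)
      = if max (position - 1) 0 < ((PySem.Chars.splitOn (PySem.Chars.rstrip text.toList) [' ']).length : Int)
        then Option.map String.ofList (PySem.List.pyGet? (PySem.Chars.splitOn (PySem.Chars.rstrip text.toList) [' ']) (max (position - 1) 0))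
        else none
  set u := PySem.Chars.rstrip text.toList with hu
  set parts := PySem.Chars.splitOn u [' '] with hp
  set n := (position - 1).toNat with hn
  have hidx : max (position - 1) 0 = (n : Int) := by omega
  rw [loopA_eq n u 0 (Nat.zero_le _), List.drop_zero, hidx]
  by_cases hlt : ((n : Int) < (parts.length : Int))
  · rw [if_pos hlt, PySem.List.pyGet?_natCast]
  · rw [if_neg hlt]
    have : parts[n]? = none := by
      apply List.getElem?_eq_none
      omega
    rw [this]
    rfl


-- ===== VERDICT (by name: the statement is the Claim_ definition above) =====
theorem extract_by_space_spec : Claim_equal_extract_by_space := by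
  intro text position _
  unfold Spec_extract_by_space
  exact ports_agree text position
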